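-- pv_equiv track=rewrite | github.com/auribest/lux-ai-challenge-2021_dryeye | submission_v1.3/agent.py | night_comes_soon
-- ===== SOURCE A (Python) =====
-- def night_comes_soon(observation):
--     current_round = observation["step"]
--     value = 20
--     while value < 360:
--         if value < current_round < value + 10:
--             return True
--         value +=40
--     return False
-- ===== SOURCE B (Python) =====
-- def night_comes_soon(observation):
--     current_round = observation["step"]
--     return 20 < current_round < 350 and (current_round - 21) % 40 < 9
-- ===== Notes on version B (the rewrite author's own statement) =====
-- stated objective: simpler
-- what changed: Replaced the 9-iteration while loop scanning windows (20,30),(60,70),...,(340,350) with a single closed-form modular test 20 < step < 350 and (step-21) % 40 < 9.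
import Mathlib
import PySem

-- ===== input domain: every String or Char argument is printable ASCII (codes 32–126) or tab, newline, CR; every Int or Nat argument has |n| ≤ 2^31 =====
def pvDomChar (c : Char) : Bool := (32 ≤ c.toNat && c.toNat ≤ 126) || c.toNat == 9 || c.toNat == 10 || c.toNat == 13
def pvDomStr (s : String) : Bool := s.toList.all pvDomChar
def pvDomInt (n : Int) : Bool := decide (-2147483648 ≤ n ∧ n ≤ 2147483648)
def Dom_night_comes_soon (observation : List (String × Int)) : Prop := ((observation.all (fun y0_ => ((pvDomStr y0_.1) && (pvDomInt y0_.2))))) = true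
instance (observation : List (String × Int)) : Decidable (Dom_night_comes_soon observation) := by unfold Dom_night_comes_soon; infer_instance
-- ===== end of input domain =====

-- B replaces A's while loop over window starts with one closed-form modular test; same return value wherever A returns ("step" key present, which Pre_ requires).
-- ===== PORT A =====
-- while value < 360: if value < cr < value+10: return True; value += 40
def nightLoopA (cr : Int) (value : Int) : Bool :=
  if _h : value < 360 then
    if value < cr ∧ cr < value + 10 then true else nightLoopA cr (value + 40)
  else false
termination_by (360 - value).toNat
decreasing_by omega

def night_comes_soon (observation : List (String × Int)) : Bool :=
  match PySem.Dict.get? (PySem.Dict.mk observation) "step" with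
  | none => false   -- KeyError in Python: excluded by Pre_
  | some cr => nightLoopA cr 20

-- ===== PORT B =====
def night_comes_soon_alt (observation : List (String × Int)) : Bool :=
  match PySem.Dict.get? (PySem.Dict.mk observation) "step" with
  | none => false   -- KeyError in Python: excluded by Pre_
  | some cr => decide (20 < cr ∧ cr < 350 ∧ PySem.Int.mod (cr - 21) 40 < 9)

-- ===== PRECONDITION & SPEC =====
-- Pre_: the dict has a "step" key; otherwise both Pythons raise KeyError.
def Pre_night_comes_soon (observation : List (String × Int)) : Prop :=
  (PySem.Dict.get? (PySem.Dict.mk observation) "step").isSome = true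
instance (observation : List (String × Int)) : Decidable (Pre_night_comes_soon observation) := by unfold Pre_night_comes_soon; infer_instance
def pvWitness_night_comes_soon : (List (String × Int)) := [("step", 25)]
def Spec_night_comes_soon (observation : List (String × Int)) (out : Bool) : Prop := out = night_comes_soon_alt observation
instance (observation : List (String × Int)) (out : Bool) : Decidable (Spec_night_comes_soon observation out) := by unfold Spec_night_comes_soon; infer_instance

-- ===== CLAIM (what is proved, stated in full; the proofs are below) =====
def Claim_equal_night_comes_soon : Prop := ∀ (observation : List (String × Int)), Dom_night_comes_soon observation → Pre_night_comes_soon observation → Spec_night_comes_soon observation (night_comes_soon observation)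

-- ===== LEMMAS AND PROOFS =====
lemma nightLoopA_eq (cr : Int) :
    nightLoopA cr 20 = decide (20 < cr ∧ cr < 350 ∧ PySem.Int.mod (cr - 21) 40 < 9) := by
  rw [nightLoopA, nightLoopA, nightLoopA, nightLoopA, nightLoopA,
      nightLoopA, nightLoopA, nightLoopA, nightLoopA, nightLoopA]
  have hm : PySem.Int.mod (cr - 21) 40 = (cr - 21) % 40 :=
    PySem.Int.mod_eq_emod_of_pos (by norm_num)
  rw [hm]
  norm_num
  rw [Bool.eq_iff_iff]
  simp only [Bool.or_eq_true, Bool.and_eq_true, decide_eq_true_eq]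
  omega

-- ===== VERDICT (by name: the statement is the Claim_ definition above) =====
theorem night_comes_soon_spec : Claim_equal_night_comes_soon := by
  intro observation _ _
  unfold Spec_night_comes_soon night_comes_soon night_comes_soon_alt
  cases PySem.Dict.get? (PySem.Dict.mk observation) "step" with
  | none => rfl
  | some cr => exact nightLoopA_eq cr
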